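-- pv_equiv track=rewrite | github.com/zju3dv/BoxDreamer | src/datasets/utils/objaverse_utils/objaverese_downloader.py | escape_bash_string
-- ===== SOURCE A (Python) =====
-- def escape_bash_string(s: str) -> str:
--     """Escapes special characters in a string for use in bash command
--     lines.
--
--     Args:
--     s (str): The original string to escape.
--
--     Returns:
--     str: The escaped string suitable for bash commands.
--     """
--     # Characters to escape
--     # You might need to add more characters here depending on the context
--     bash_special_chars = [
--         "(",
--         ")",
--         "&",
--         "|",
--         ";",
--         "<",
--         ">",
--         "`",
--         "$",
--         '"',
--         "'",
--         "{",
--         "}",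
--     ]
--
--     # Escaping each special character with a backslash
--     escaped_string = s
--     for char in bash_special_chars:
--         escaped_string = escaped_string.replace(char, f"\\{char}")
--
--     return escaped_string
-- ===== SOURCE B (Python) =====
-- def escape_bash_string(s: str) -> str:
--     """Escapes special characters in a string for use in bash command
--     lines.
--
--     Args:
--     s (str): The original string to escape.
--
--     Returns:
--     str: The escaped string suitable for bash commands.
--     """
--     specials = set('()&|;<>`$"\'{}')
--     return ''.join('\\' + c if c in specials else c for c in s)
-- ===== Notes on version B (the rewrite author's own statement) =====
-- stated objective: idiomatic
-- what changed: Replaces A's 13 sequential str.replace scans (each rebuilding the whole string) with one single pass over the input joining each character, escaped if it is in a precomputed set of special characters.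
import Mathlib
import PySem

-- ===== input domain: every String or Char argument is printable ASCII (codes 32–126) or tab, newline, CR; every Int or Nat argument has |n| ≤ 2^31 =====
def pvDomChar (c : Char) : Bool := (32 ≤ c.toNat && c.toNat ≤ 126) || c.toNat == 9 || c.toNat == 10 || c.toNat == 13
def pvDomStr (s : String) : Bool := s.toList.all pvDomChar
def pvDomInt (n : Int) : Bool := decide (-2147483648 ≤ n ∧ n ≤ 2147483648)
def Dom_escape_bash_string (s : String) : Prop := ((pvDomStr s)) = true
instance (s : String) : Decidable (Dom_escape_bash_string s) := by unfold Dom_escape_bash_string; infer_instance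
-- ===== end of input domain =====

-- B replaces A's 13 sequential str.replace passes with one single pass consulting a set; same output, not faster (A's scans are C-level).

-- ===== PORT A =====
def bashSpecialCharsA : List String :=
  ["(", ")", "&", "|", ";", "<", ">", "`", "$", "\"", "'", "{", "}"]

def escape_bash_string (s : String) : String :=
  bashSpecialCharsA.foldl (fun escaped ch => PySem.Str.replace escaped ch ("\\" ++ ch)) s

-- ===== PORT B =====
def bashSpecialSet : PySem.Set Char :=
  PySem.Set.ofList ['(', ')', '&', '|', ';', '<', '>', '`', '$', '"', '\'', '{', '}']

def escape_bash_string_alt (s : String) : String :=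
  String.ofList (s.toList.flatMap (fun c => if c ∈ bashSpecialSet then ['\\', c] else [c]))

-- ===== PRECONDITION & SPEC =====
def Spec_escape_bash_string (s : String) (out : String) : Prop := out = escape_bash_string_alt s
instance (s : String) (out : String) : Decidable (Spec_escape_bash_string s out) := by unfold Spec_escape_bash_string; infer_instance

-- ===== CLAIM (what is proved, stated in full; the proofs are below) =====
def Claim_equal_escape_bash_string : Prop := ∀ (s : String), Dom_escape_bash_string s → Spec_escape_bash_string s (escape_bash_string s)

-- ===== LEMMAS AND PROOFS =====

-- single-pass escaping with respect to a set S of already-processed characters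
def escS (S : List Char) (l : List Char) : List Char :=
  l.flatMap (fun c => if c ∈ S then ['\\', c] else [c])

lemma replace_go_single (a : Char) (new : List Char) :
    ∀ (l acc : List Char) (fuel : Nat), l.length ≤ fuel →
    PySem.Chars.replace.go [a] new fuel l acc
      = acc.reverse ++ l.flatMap (fun c => if c = a then new else [c]) := by
  intro l
  induction l with
  | nil =>
    intro acc fuel _
    cases fuel <;> simp [PySem.Chars.replace.go]
  | cons c t ih =>
    intro acc fuel hf
    cases fuel with
    | zero => simp at hf
    | succ n =>
      simp only [PySem.Chars.replace.go]
      by_cases h : c = a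
      · subst h
        have hpre : List.isPrefixOf [c] (c :: t) = true := by
          simp [List.isPrefixOf]
        rw [if_pos hpre]
        have := ih (new.reverse ++ acc) n (by simpa using Nat.le_of_succ_le_succ hf)
        simp [this]
      · have hpre : List.isPrefixOf [a] (c :: t) = false := by
          simp only [List.isPrefixOf, Bool.and_true, beq_eq_false_iff_ne, ne_eq]
          exact fun hh => h hh.symm
        rw [hpre]
        simp only [Bool.false_eq_true, if_false]
        have := ih (c :: acc) n (Nat.le_of_succ_le_succ hf)
        simp [this, h]

lemma replace_single (a : Char) (new l : List Char) :
    PySem.Chars.replace l [a] new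
      = l.flatMap (fun c => if c = a then new else [c]) := by
  simp only [PySem.Chars.replace, List.isEmpty]
  exact replace_go_single a new l [] l.length le_rfl

-- one more replace pass over an already partially escaped string extends the set
lemma escS_step (a : Char) (S : List Char) (ha : a ∉ S) (hb : a ≠ '\\') (l : List Char) :
    (escS S l).flatMap (fun c => if c = a then ['\\', a] else [c]) = escS (S ++ [a]) l := by
  induction l with
  | nil => simp [escS]
  | cons c t ih =>
    simp only [escS, List.flatMap_cons] at *
    rw [List.flatMap_append, ih]
    congr 1
    by_cases hc : c ∈ S
    · have hca : c ≠ a := fun h => ha (h ▸ hc)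
      simp [hc, hca, Ne.symm hb]
    · by_cases hca : c = a
      · subst hca; simp [hc]
      · simp [hc, hca]

lemma escS_chain (cs : List Char) :
    ∀ (S : List Char), (S ++ cs).Nodup → '\\' ∉ cs → ∀ l : List Char,
    cs.foldl (fun acc a => acc.flatMap (fun c => if c = a then ['\\', a] else [c])) (escS S l)
      = escS (S ++ cs) l := by
  induction cs with
  | nil => intro S _ _ l; simp
  | cons a t ih =>
    intro S hnd hbs l
    have ha : a ∉ S := fun h =>
      List.disjoint_of_nodup_append hnd h (List.mem_cons_self ..)
    have hb : a ≠ '\\' := fun h => hbs (h ▸ List.mem_cons_self ..)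
    simp only [List.foldl_cons]
    rw [escS_step a S ha hb l]
    have := ih (S ++ [a]) (by rw [List.append_assoc]; simpa using hnd)
      (fun h => hbs (List.mem_cons_of_mem _ h)) l
    simpa [List.append_assoc] using this

lemma escS_nil (l : List Char) : escS [] l = l := by
  simp [escS]

-- A's string-level fold over one-char special strings, seen on char lists
lemma foldA_toList (cs : List Char) :
    ∀ (t : String),
    ((cs.map (fun c => String.ofList [c])).foldl
        (fun escaped ch => PySem.Str.replace escaped ch ("\\" ++ ch)) t).toList
      = cs.foldl (fun acc a => acc.flatMap (fun c => if c = a then ['\\', a] else [c])) t.toList := by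
  induction cs with
  | nil => intro t; simp
  | cons a u ih =>
    intro t
    simp only [List.map_cons, List.foldl_cons]
    rw [ih]
    congr 1
    rw [PySem.Str.toList_replace, String.toList_append]
    simp only [String.toList_ofList]
    rw [replace_single]
    rfl

-- ===== VERDICT (by name: the statement is the Claim_ definition above) =====
theorem escape_bash_string_spec : Claim_equal_escape_bash_string := by
  intro s _
  unfold Spec_escape_bash_string escape_bash_string escape_bash_string_alt
  apply String.ext
  have hmap : bashSpecialCharsA
      = (['(', ')', '&', '|', ';', '<', '>', '`', '$', '"', '\'', '{', '}'].map
          (fun c => String.ofList [c])) := rfl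
  rw [hmap, foldA_toList]
  have key := escS_chain ['(', ')', '&', '|', ';', '<', '>', '`', '$', '"', '\'', '{', '}']
    [] (by decide) (by decide) s.toList
  rw [escS_nil] at key
  rw [key, String.toList_ofList]
  simp [escS, bashSpecialSet, PySem.Set.mem_ofList]
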